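-- pv_equiv track=rewrite | github.com/omnimasudo/SeraphyAgent | public/skills/david-evaristo/lista-sms/scripts/sms_reader.py | extract_default_subids
-- ===== SOURCE A (Python) =====
-- def validate_sub_id(sub_id):
--     """Valida se o sub_id é válido."""
--     if not sub_id:
--         return False
--     try:
--         sub_id_int = int(sub_id)
--         return sub_id_int > 0
--     except (ValueError, TypeError):
--         return False
--
-- def extract_default_subids(output):
--     """Extrai mDefaultSubId e mActiveDataSubId do output."""
--     default_sub_id = None
--     active_sub_id = None
--
--     for line in output.splitlines():
--         if "mDefaultSubId=" in line:
--             try: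
--                 default_sub_id = line.split("mDefaultSubId=")[1].strip()
--                 if not validate_sub_id(default_sub_id):
--                     default_sub_id = None
--             except Exception:
--                 pass
--
--         if "mActiveDataSubId=" in line:
--             try:
--                 active_sub_id = line.split("mActiveDataSubId=")[1].strip()
--                 if not validate_sub_id(active_sub_id):
--                     active_sub_id = None
--             except Exception:
--                 pass
--
--     return default_sub_id, active_sub_id
-- ===== SOURCE B (Python) =====
-- def validate_sub_id(sub_id):
--     """Valida se o sub_id é válido."""
--     if not sub_id:
--         return False
--     try:
--         return int(sub_id) > 0
--     except (ValueError, TypeError):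
--         return False
--
-- def _find_last_valid(output, marker):
--     result = None
--     for line in output.splitlines():
--         if marker in line:
--             value = line.split(marker)[1].strip()
--             result = value if validate_sub_id(value) else None
--     return result
--
-- def extract_default_subids(output):
--     """Extrai mDefaultSubId e mActiveDataSubId do output."""
--     return (_find_last_valid(output, "mDefaultSubId="),
--             _find_last_valid(output, "mActiveDataSubId="))
-- ===== Notes on version B (the rewrite author's own statement) =====
-- stated objective: simpler
-- what changed: A's single scan threading a pair of mutable slots through one loop is replaced by a generic helper find_last_valid(output, marker) that scans the lines for one marker (last matching line wins, invalid value resets to None), called once per marker; the pair bookkeeping disappears.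
import Mathlib
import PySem

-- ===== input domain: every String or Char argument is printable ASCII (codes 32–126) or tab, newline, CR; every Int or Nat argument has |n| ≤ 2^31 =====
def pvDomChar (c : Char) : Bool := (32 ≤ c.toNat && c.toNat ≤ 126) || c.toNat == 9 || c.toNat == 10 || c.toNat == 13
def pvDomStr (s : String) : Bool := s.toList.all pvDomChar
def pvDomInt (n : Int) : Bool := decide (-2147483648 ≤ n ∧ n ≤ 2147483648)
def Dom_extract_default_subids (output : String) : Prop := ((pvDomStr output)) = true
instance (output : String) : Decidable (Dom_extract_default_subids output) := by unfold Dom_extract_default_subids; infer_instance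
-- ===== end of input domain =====

-- B replaces A's one combined scan carrying a pair of slots by a generic per-marker
-- scan helper called twice; same results, plainer bookkeeping (objective: simpler).

-- ===== PORT A =====
-- shared helper of the Python module (used verbatim by both A and B)
def validate_sub_id (sub_id : String) : Bool :=
  if sub_id = "" then false          -- `if not sub_id`
  else
    match PySem.Int.ofStr? sub_id with   -- int(sub_id); none = ValueError
    | some n => decide (0 < n)
    | none => false

def extract_default_subids (output : String) : Option String × Option String :=
  (PySem.Str.splitlines output).foldl
    (fun st line =>
      let st1 : Option String × Option String :=
        if PySem.Str.isIn "mDefaultSubId=" line then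
          match PySem.Str.split? line "mDefaultSubId=" with
          | some parts =>
            match parts[1]? with
            | some p =>
              let d := PySem.Str.strip p
              (if validate_sub_id d then some d else none, st.2)
            | none => st          -- except Exception: pass (unreachable: marker in line)
          | none => st            -- split? is none only for sep = ""; sep is a literal here
        else st
      let st2 : Option String × Option String :=
        if PySem.Str.isIn "mActiveDataSubId=" line then
          match PySem.Str.split? line "mActiveDataSubId=" with
          | some parts =>
            match parts[1]? with
            | some p =>
              let a := PySem.Str.strip p
              (st1.1, if validate_sub_id a then some a else none)
            | none => st1         -- except Exception: pass (unreachable: marker in line)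
          | none => st1
        else st1
      st2)
    (none, none)

-- ===== PORT B =====
def find_last_valid (output : String) (marker : String) : Option String :=
  (PySem.Str.splitlines output).foldl
    (fun result line =>
      if PySem.Str.isIn marker line then
        match PySem.Str.split? line marker with
        | some parts =>
          match parts[1]? with
          | some p =>
            let value := PySem.Str.strip p
            if validate_sub_id value then some value else none
          | none => result        -- unreachable: marker in line gives ≥ 2 parts
        | none => result          -- unreachable: marker is a nonempty literal
      else result)
    none

def extract_default_subids_alt (output : String) : Option String × Option String :=
  (find_last_valid output "mDefaultSubId=", find_last_valid output "mActiveDataSubId=")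

-- ===== PRECONDITION & SPEC =====
def Spec_extract_default_subids (output : String) (out : Option String × Option String) : Prop := out = extract_default_subids_alt output
instance (output : String) (out : Option String × Option String) : Decidable (Spec_extract_default_subids output out) := by unfold Spec_extract_default_subids; infer_instance

-- ===== CLAIM (what is proved, stated in full; the proofs are below) =====
def Claim_equal_extract_default_subids : Prop := ∀ (output : String), Dom_extract_default_subids output → Spec_extract_default_subids output (extract_default_subids output)

-- ===== LEMMAS AND PROOFS =====

-- B's per-line update, abstracted over the marker (definally the body of find_last_valid's fold)
def bstep (marker : String) (result : Option String) (line : String) : Option String :=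
  if PySem.Str.isIn marker line then
    match PySem.Str.split? line marker with
    | some parts =>
      match parts[1]? with
      | some p =>
        let value := PySem.Str.strip p
        if validate_sub_id value then some value else none
      | none => result
    | none => result
  else result

lemma find_last_valid_eq (output marker : String) :
    find_last_valid output marker = (PySem.Str.splitlines output).foldl (bstep marker) none := rfl

-- A's per-line update acts componentwise: first slot as bstep on the first marker,
-- second slot as bstep on the second marker.
lemma astep_eq (st : Option String × Option String) (line : String) :
    (let st1 : Option String × Option String :=
        if PySem.Str.isIn "mDefaultSubId=" line then
          match PySem.Str.split? line "mDefaultSubId=" with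
          | some parts =>
            match parts[1]? with
            | some p =>
              let d := PySem.Str.strip p
              (if validate_sub_id d then some d else none, st.2)
            | none => st
          | none => st
        else st
      let st2 : Option String × Option String :=
        if PySem.Str.isIn "mActiveDataSubId=" line then
          match PySem.Str.split? line "mActiveDataSubId=" with
          | some parts =>
            match parts[1]? with
            | some p =>
              let a := PySem.Str.strip p
              (st1.1, if validate_sub_id a then some a else none)
            | none => st1
          | none => st1
        else st1
      st2)
    = (bstep "mDefaultSubId=" st.1 line, bstep "mActiveDataSubId=" st.2 line) := by
  simp only [bstep]
  cases h1 : PySem.Str.isIn "mDefaultSubId=" line <;>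
  cases h2 : PySem.Str.isIn "mActiveDataSubId=" line <;>
  simp only [h1, h2, Bool.false_eq_true, if_true, if_false] <;>
  try rfl
  all_goals (
    rcases hs1 : PySem.Str.split? line "mDefaultSubId=" with _ | parts1 <;>
    rcases hs2 : PySem.Str.split? line "mActiveDataSubId=" with _ | parts2 <;>
    simp only [hs1, hs2] <;> try rfl)
  all_goals ((repeat' split) <;> rfl)

lemma foldl_pair (f g : Option String → String → Option String) (ls : List String)
    (a b : Option String) :
    ls.foldl (fun st l => (f st.1 l, g st.2 l)) (a, b) = (ls.foldl f a, ls.foldl g b) := by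
  induction ls generalizing a b with
  | nil => rfl
  | cons l ls ih => simp [List.foldl, ih]

-- ===== VERDICT (by name: the statement is the Claim_ definition above) =====
theorem extract_default_subids_spec : Claim_equal_extract_default_subids := by
  intro output _
  show extract_default_subids output = extract_default_subids_alt output
  unfold extract_default_subids extract_default_subids_alt
  rw [find_last_valid_eq, find_last_valid_eq]
  rw [show (fun (st : Option String × Option String) (line : String) =>
        (let st1 : Option String × Option String :=
          if PySem.Str.isIn "mDefaultSubId=" line then
            match PySem.Str.split? line "mDefaultSubId=" with
            | some parts =>
              match parts[1]? with
              | some p =>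
                let d := PySem.Str.strip p
                (if validate_sub_id d then some d else none, st.2)
              | none => st
            | none => st
          else st
        let st2 : Option String × Option String :=
          if PySem.Str.isIn "mActiveDataSubId=" line then
            match PySem.Str.split? line "mActiveDataSubId=" with
            | some parts =>
              match parts[1]? with
              | some p =>
                let a := PySem.Str.strip p
                (st1.1, if validate_sub_id a then some a else none)
              | none => st1
            | none => st1
          else st1
        st2))
      = (fun st line => (bstep "mDefaultSubId=" st.1 line, bstep "mActiveDataSubId=" st.2 line))
      from funext fun st => funext fun line => astep_eq st line]
  exact foldl_pair _ _ _ none none
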